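-- pv_equiv track=rewrite | github.com/RadhaRamanJha/PythonCodes | practice/number_operation_practice/basic_programs_of_python.py | position_in_fibbonaci_series
-- ===== SOURCE A (Python) =====
-- def position_in_fibbonaci_series(n,k):
--     """Returns position of kth multiple of 'n' in fibbonaci-series"""
--     if(type(n)==int):
--         if(type(k)==int):
--             a,b,position = 0,1,1
--             current_fibbonaci_number = a
--             current_k_value = 0
--             while (current_k_value <= k):
--                 current_fibbonaci_number = b
--                 a,b = b,a+b
--                 position +=1
--                 if (current_fibbonaci_number % n == 0):
--                     current_k_value += 1
--                     if(current_k_value == k):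
--                         return position
--         else:
--             raise(TypeError('Missing appropriate position type'))
--     else:
--         raise Exception("Missing appropriate number type")
-- ===== SOURCE B (Python) =====
-- def position_in_fibbonaci_series(n, k):
--     """Returns position of kth multiple of 'n' in fibbonaci-series.
--     Computes the rank of apparition z(n) once over Fibonacci residues mod |n|;
--     the multiples of n in the Fibonacci sequence sit exactly at indices z, 2z, 3z, ...
--     so the answer is k*z + 1 (positions are 1 ahead of indices in A's counting)."""
--     m = abs(n)
--     a, b = 0, 1 % m
--     z = 1
--     while b != 0:
--         a, b = b, (a + b) % m
--         z += 1
--     return k * z + 1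
-- ===== Notes on version B (the rewrite author's own statement) =====
-- stated objective: faster
-- what changed: B computes the rank of apparition z(|n|) once by scanning Fibonacci residues mod |n| and returns k*z+1 in closed form, instead of A's scan of k*z(n) arbitrary-precision Fibonacci numbers counting the multiples one by one.
-- outside the precondition, e.g. on position_in_fibbonaci_series(5, 0): A returns None, B returns 1; on position_in_fibbonaci_series(0, 1): A raises ZeroDivisionError, B raises ZeroDivisionError
import Mathlib
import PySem

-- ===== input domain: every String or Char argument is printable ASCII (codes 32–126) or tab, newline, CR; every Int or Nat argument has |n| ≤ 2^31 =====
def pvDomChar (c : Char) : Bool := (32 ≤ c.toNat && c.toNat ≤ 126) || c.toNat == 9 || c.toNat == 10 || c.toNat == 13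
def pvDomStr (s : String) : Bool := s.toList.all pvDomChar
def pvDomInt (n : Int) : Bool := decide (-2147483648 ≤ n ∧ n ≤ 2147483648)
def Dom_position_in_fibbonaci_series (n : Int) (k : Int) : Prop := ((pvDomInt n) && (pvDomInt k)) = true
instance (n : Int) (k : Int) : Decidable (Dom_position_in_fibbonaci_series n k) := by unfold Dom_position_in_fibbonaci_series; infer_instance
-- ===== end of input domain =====

-- B computes the rank of apparition z(|n|) once over Fibonacci residues mod |n| and
-- returns k*z+1 directly, instead of A's scan of k·z full-size Fibonacci numbers.

-- ===== PORT A =====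
-- A's while-loop, transliterated with a fuel argument; under Pre_ the fuel
-- k.toNat * (n.natAbs * n.natAbs) + 2 is proved sufficient (the loop returns before it runs out).
def pvLoopA (n k : Int) : Nat → Int → Int → Int → Int → Int
  | 0, _, _, _, _ => 0
  | fuel+1, a, b, position, ck =>
    if ck ≤ k then
      -- current_fibbonaci_number = b; a,b = b,a+b; position += 1
      let cur := b
      let a' := b
      let b' := a + b
      let position' := position + 1
      if PySem.Int.mod cur n = 0 then
        if ck + 1 = k then position'
        else pvLoopA n k fuel a' b' position' (ck + 1)
      else pvLoopA n k fuel a' b' position' ck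
    else 0

def position_in_fibbonaci_series (n : Int) (k : Int) : Int :=
  pvLoopA n k (k.toNat * (n.natAbs * n.natAbs) + 2) 0 1 1 0

-- ===== PORT B =====
-- Source B's while-loop over Fibonacci residues mod |n|; fuel m*m+2 is proved sufficient under Pre_.
def pvLoopB (m : Nat) : Nat → Nat → Nat → Nat → Nat
  | 0, _, _, z => z
  | fuel+1, a, b, z => if b ≠ 0 then pvLoopB m fuel b ((a + b) % m) (z + 1) else z

def position_in_fibbonaci_series_alt (n : Int) (k : Int) : Int :=
  let m := n.natAbs
  let z := pvLoopB m (m * m + 2) 0 (1 % m) 1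
  k * (z : Int) + 1

-- ===== PRECONDITION & SPEC =====
-- Pre_ excludes n = 0, where A raises ZeroDivisionError, and k ≤ 0, where A's loop
-- falls through and A returns None, which is not an int.
def Pre_position_in_fibbonaci_series (n : Int) (k : Int) : Prop := n ≠ 0 ∧ 1 ≤ k
instance (n : Int) (k : Int) : Decidable (Pre_position_in_fibbonaci_series n k) := by
  unfold Pre_position_in_fibbonaci_series; infer_instance
def pvWitness_position_in_fibbonaci_series : Int × Int := (2, 1)

def Spec_position_in_fibbonaci_series (n : Int) (k : Int) (out : Int) : Prop := out = position_in_fibbonaci_series_alt n k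
instance (n : Int) (k : Int) (out : Int) : Decidable (Spec_position_in_fibbonaci_series n k out) := by unfold Spec_position_in_fibbonaci_series; infer_instance

-- ===== CLAIM (what is proved, stated in full; the proofs are below) =====
def Claim_equal_position_in_fibbonaci_series : Prop := ∀ (n : Int) (k : Int), Dom_position_in_fibbonaci_series n k → Pre_position_in_fibbonaci_series n k → Spec_position_in_fibbonaci_series n k (position_in_fibbonaci_series n k)

-- ===== LEMMAS AND PROOFS =====

-- Sliding a coincident pair of Fibonacci residues back to the origin.
theorem pvPairBack {N : ℕ} : ∀ i d : ℕ,
    ((Nat.fib i : ZMod N) = Nat.fib (i + d)) →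
    ((Nat.fib (i + 1) : ZMod N) = Nat.fib (i + 1 + d)) →
    ((Nat.fib 0 : ZMod N) = Nat.fib d) := by
  intro i
  induction i with
  | zero => intro d h1 _; simpa using h1
  | succ i ih =>
    intro d h1 h2
    have h1' : (Nat.fib (i + 1) : ZMod N) = Nat.fib (i + d + 1) := by
      convert h1 using 3; omega
    have h2' : (Nat.fib (i + 2) : ZMod N) = Nat.fib (i + d + 2) := by
      convert h2 using 3 <;> omega
    apply ih d
    · have e1 : (Nat.fib (i + 2) : ZMod N) = Nat.fib i + Nat.fib (i + 1) := by
        rw [Nat.fib_add_two]; push_cast; ring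
      have e2 : (Nat.fib (i + d + 2) : ZMod N) = Nat.fib (i + d) + Nat.fib (i + d + 1) := by
        rw [Nat.fib_add_two]; push_cast; ring
      have h3 := e1.symm.trans (h2'.trans e2)
      rw [h1'] at h3
      exact add_right_cancel h3
    · exact h1

-- Some positive Fibonacci index ≤ N² is divisible by N (pigeonhole on residue pairs).
theorem pvExistsZero (N : ℕ) (hN : 0 < N) : ∃ p, 0 < p ∧ p ≤ N * N ∧ N ∣ Nat.fib p := by
  haveI : NeZero N := ⟨hN.ne'⟩
  have hcard : Fintype.card (ZMod N × ZMod N) < Fintype.card (Fin (N * N + 1)) := by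
    simp [ZMod.card]
  obtain ⟨i, j, hne, heq⟩ := Fintype.exists_ne_map_eq_of_card_lt
    (fun i : Fin (N * N + 1) => ((Nat.fib i : ZMod N), (Nat.fib (i + 1) : ZMod N))) hcard
  have hval : i.val ≠ j.val := fun h => hne (Fin.ext h)
  have hA : (Nat.fib i.val : ZMod N) = Nat.fib j.val := congrArg Prod.fst heq
  have hB : (Nat.fib (i.val + 1) : ZMod N) = Nat.fib (j.val + 1) := congrArg Prod.snd heq
  rcases Nat.lt_or_ge i.val j.val with h | h
  · refine ⟨j.val - i.val, by omega, by omega, ?_⟩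
    have := pvPairBack i.val (j.val - i.val)
      (by rw [Nat.add_sub_cancel' h.le]; exact hA)
      (by rw [show i.val + 1 + (j.val - i.val) = j.val + 1 by omega]; exact hB)
    rw [← (ZMod.natCast_eq_zero_iff _ _)]
    simpa using this.symm
  · have hlt : j.val < i.val := by omega
    refine ⟨i.val - j.val, by omega, by omega, ?_⟩
    have := pvPairBack j.val (i.val - j.val)
      (by rw [Nat.add_sub_cancel' hlt.le]; exact hA.symm)
      (by rw [show j.val + 1 + (i.val - j.val) = i.val + 1 by omega]; exact hB.symm)
    rw [← (ZMod.natCast_eq_zero_iff _ _)]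
    simpa using this.symm

def pvEx (N : ℕ) (hN : 0 < N) : ∃ p, 0 < p ∧ N ∣ Nat.fib p :=
  (pvExistsZero N hN).elim (fun p hp => ⟨p, hp.1, hp.2.2⟩)

-- the rank of apparition of N
def pvZ (N : ℕ) (hN : 0 < N) : ℕ := Nat.find (pvEx N hN)

theorem pvZ_pos (N : ℕ) (hN : 0 < N) : 0 < pvZ N hN := (Nat.find_spec (pvEx N hN)).1
theorem pvZ_dvd (N : ℕ) (hN : 0 < N) : N ∣ Nat.fib (pvZ N hN) := (Nat.find_spec (pvEx N hN)).2
theorem pvZ_le_sq (N : ℕ) (hN : 0 < N) : pvZ N hN ≤ N * N := by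
  obtain ⟨p, hp1, hp2, hp3⟩ := pvExistsZero N hN
  exact le_trans (Nat.find_min' (pvEx N hN) ⟨hp1, hp3⟩) hp2

-- multiples of N in the Fibonacci sequence sit exactly at the multiples of z(N)
theorem pvZ_iff (N : ℕ) (hN : 0 < N) (m : ℕ) : N ∣ Nat.fib m ↔ pvZ N hN ∣ m := by
  constructor
  · intro hm
    rcases Nat.eq_zero_or_pos m with rfl | hmpos
    · exact Dvd.intro 0 rfl
    · set z := pvZ N hN with hz
      have hg : N ∣ Nat.fib (Nat.gcd m z) := by
        rw [Nat.fib_gcd]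
        exact Nat.dvd_gcd hm (pvZ_dvd N hN)
      have hgpos : 0 < Nat.gcd m z := Nat.gcd_pos_of_pos_left _ hmpos
      have hgz : Nat.gcd m z ≤ z := Nat.le_of_dvd (pvZ_pos N hN) (Nat.gcd_dvd_right m z)
      have : ¬ Nat.gcd m z < z := fun hlt => Nat.find_min (pvEx N hN) hlt ⟨hgpos, hg⟩
      have hge : Nat.gcd m z = z := by omega
      exact hge ▸ Nat.gcd_dvd_left m z
  · intro hzm
    exact dvd_trans (pvZ_dvd N hN) (Nat.fib_dvd _ _ hzm)

-- B's loop computes z(N)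
theorem pvLoopB_eq (N : ℕ) (hN : 0 < N) : ∀ fuel j, 1 ≤ j → j ≤ pvZ N hN →
    pvZ N hN + 1 - j ≤ fuel →
    (∀ i, 1 ≤ i → i < j → ¬ N ∣ Nat.fib i) →
    pvLoopB N fuel (Nat.fib (j - 1) % N) (Nat.fib j % N) j = pvZ N hN := by
  intro fuel
  induction fuel with
  | zero => intro j h1 h2 h3 _; omega
  | succ fuel ih =>
    intro j h1 h2 h3 hnz
    by_cases hb : Nat.fib j % N = 0
    · have hdvd : N ∣ Nat.fib j := Nat.dvd_of_mod_eq_zero hb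
      have hle : pvZ N hN ≤ j := Nat.find_min' (pvEx N hN) ⟨h1, hdvd⟩
      have hj : j = pvZ N hN := by omega
      subst hj
      simp [pvLoopB, hb]
    · have hjz : j < pvZ N hN := by
        rcases Nat.lt_or_ge j (pvZ N hN) with h | h
        · exact h
        · exfalso; have : j = pvZ N hN := by omega
          exact hb (Nat.mod_eq_zero_of_dvd (this ▸ pvZ_dvd N hN))
      have hfib : Nat.fib (j + 1) = Nat.fib (j - 1) + Nat.fib j := by
        have := Nat.fib_add_two (n := j - 1)
        rw [show j - 1 + 2 = j + 1 by omega, show j - 1 + 1 = j by omega] at this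
        exact this
      have hstep : (Nat.fib (j - 1) % N + Nat.fib j % N) % N = Nat.fib (j + 1) % N := by
        rw [hfib]; exact (Nat.add_mod _ _ _).symm
      have := ih (j + 1) (by omega) (by omega) (by omega)
        (by intro i hi1 hi2
            rcases Nat.lt_or_ge i j with h | h
            · exact hnz i hi1 h
            · have : i = j := by omega
              subst this
              intro hd; exact hb (Nat.mod_eq_zero_of_dvd hd))
      rw [show j + 1 - 1 = j from rfl] at this
      simp only [pvLoopB, ne_eq, hb, not_false_eq_true, if_pos]
      rw [hstep]
      exact this

theorem pvAlt_eq (n k : Int) (hn : n ≠ 0) :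
    position_in_fibbonaci_series_alt n k = k * (pvZ n.natAbs (Int.natAbs_pos.mpr hn) : Int) + 1 := by
  have hN : 0 < n.natAbs := Int.natAbs_pos.mpr hn
  have hB := pvLoopB_eq n.natAbs hN (n.natAbs * n.natAbs + 2) 1 (le_refl 1)
    (pvZ_pos _ hN) (by have := pvZ_le_sq n.natAbs hN; omega)
    (by intro i h1 h2; omega)
  simp only [position_in_fibbonaci_series_alt]
  rw [show (1 : ℕ) - 1 = 0 from rfl, Nat.fib_zero, Nat.fib_one, Nat.zero_mod] at hB
  rw [hB]

-- A's loop returns k*z(|n|)+1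
theorem pvLoopA_eq (n k : Int) (hn : n ≠ 0) (hk : 1 ≤ k) :
    ∀ fuel (t : ℕ), 1 ≤ t →
    ((((t - 1) / pvZ n.natAbs (Int.natAbs_pos.mpr hn) : ℕ) : Int) < k) →
    k.toNat * pvZ n.natAbs (Int.natAbs_pos.mpr hn) + 2 - t ≤ fuel →
    pvLoopA n k fuel (Nat.fib (t - 1)) (Nat.fib t) (t : Int) (((t - 1) / pvZ n.natAbs (Int.natAbs_pos.mpr hn) : ℕ) : Int)
      = k * (pvZ n.natAbs (Int.natAbs_pos.mpr hn) : Int) + 1 := by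
  have hN : 0 < n.natAbs := Int.natAbs_pos.mpr hn
  set z := pvZ n.natAbs hN with hzdef
  have hzpos : 0 < z := pvZ_pos _ hN
  intro fuel
  induction fuel with
  | zero =>
    intro t h1 hlt hfuel
    exfalso
    have hlt' : (t - 1) / z < k.toNat := by omega
    have : t - 1 < k.toNat * z := by
      have := (Nat.div_lt_iff_lt_mul hzpos).mp hlt'
      omega
    omega
  | succ fuel ih =>
    intro t h1 hlt hfuel
    have hmod : (PySem.Int.mod (Nat.fib t : ℤ) n = 0) ↔ (z ∣ t) := by
      rw [PySem.Int.mod_eq_zero_iff_dvd]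
      rw [← Int.natAbs_dvd, Int.natCast_dvd_natCast]
      exact pvZ_iff _ hN t
    have hsucc : t / z = (t - 1) / z + (if z ∣ t then 1 else 0) := by
      have := Nat.succ_div (a := t - 1) (b := z)
      rw [show t - 1 + 1 = t by omega] at this
      exact this
    have hfib : (Nat.fib (t - 1) : ℤ) + (Nat.fib t : ℤ) = (Nat.fib (t + 1) : ℤ) := by
      have := Nat.fib_add_two (n := t - 1)
      rw [show t - 1 + 2 = t + 1 by omega, show t - 1 + 1 = t by omega] at this
      exact_mod_cast this.symm
    simp only [pvLoopA]
    rw [if_pos (le_of_lt hlt)]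
    by_cases hd : z ∣ t
    · rw [if_pos (hmod.mpr hd)]
      have htz : t / z = (t - 1) / z + 1 := by rw [hsucc, if_pos hd]
      by_cases heq : (((t - 1) / z : ℕ) : ℤ) + 1 = k
      · rw [if_pos heq]
        have hkz : t / z = k.toNat := by
          have : ((t / z : ℕ) : ℤ) = k := by rw [htz]; push_cast; omega
          omega
        have ht : t = z * k.toNat := by
          rw [← hkz]; exact (Nat.div_mul_cancel hd).symm ▸ (Nat.mul_div_cancel' hd).symm
        have : (t : ℤ) = k * z := by
          rw [ht]; push_cast [Int.toNat_of_nonneg (by omega : (0:ℤ) ≤ k)]; ring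
        omega
      · rw [if_neg heq]
        have hlt2 : ((((t + 1 - 1) / z : ℕ)) : ℤ) < k := by
          rw [show t + 1 - 1 = t from rfl, htz]; push_cast; omega
        have := ih (t + 1) (by omega) hlt2 (by omega)
        rw [show t + 1 - 1 = t from rfl, htz, ← hfib,
          show ((t + 1 : ℕ) : ℤ) = (t : ℤ) + 1 by push_cast; ring] at this
        push_cast at this ⊢
        exact this
    · rw [if_neg (fun h => hd (hmod.mp h))]
      have harg : (t + 1 - 1) / z = (t - 1) / z := by
        rw [show t + 1 - 1 = t from rfl, hsucc, if_neg hd]; omega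
      have := ih (t + 1) (by omega) (by rw [harg]; exact hlt) (by omega)
      rw [harg, ← hfib,
        show ((t + 1 : ℕ) : ℤ) = (t : ℤ) + 1 by push_cast; ring] at this
      exact this

-- ===== VERDICT (by name: the statement is the Claim_ definition above) =====
theorem position_in_fibbonaci_series_spec : Claim_equal_position_in_fibbonaci_series := by
  intro n k _ hpre
  obtain ⟨hn, hk⟩ := hpre
  unfold Spec_position_in_fibbonaci_series
  have hN : 0 < n.natAbs := Int.natAbs_pos.mpr hn
  have hz := pvZ_le_sq n.natAbs hN
  have := pvLoopA_eq n k hn hk (k.toNat * (n.natAbs * n.natAbs) + 2) 1 (le_refl 1)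
    (by simp [Nat.div_eq_of_lt, pvZ_pos]; omega)
    (by
      have : k.toNat * pvZ n.natAbs hN ≤ k.toNat * (n.natAbs * n.natAbs) :=
        Nat.mul_le_mul_left _ hz
      omega)
  simpa [position_in_fibbonaci_series, pvAlt_eq n k hn] using this
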